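-- pv_equiv track=rewrite | github.com/raitaaho/FPL | pages/Fixture Difficulty Ratings.py | get_next_gws
-- ===== SOURCE A (Python) =====
-- from collections import defaultdict
--
-- def get_next_gws(fixtures: list, extra_gw: str = 'False') -> list:
--     """
--     Find the next gameweek(s) that have not yet started.
--
--     Args:
--         fixtures (list): List of fixture dictionaries from the FPL API.
--         extra_gw (str): If 'True', return the next two gameweeks; otherwise, return only the next gameweek.
--
--     Returns:
--         list: A list containing the next gameweek(s) as integers.
--     """
--     game_weeks = defaultdict(list)
--     for fixture in fixtures:
--         game_weeks[fixture["event"]].append(fixture)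
--     next_gameweek = None
--     for event in sorted(game_weeks.keys()):
--         if all(not fixture['finished_provisional'] for fixture in game_weeks[event]):
--             next_gameweek = event
--             break
--     if next_gameweek is None:
--         raise Exception("No upcoming gameweek found.")
--     if extra_gw == 'True':
--         return [next_gameweek, next_gameweek + 1]
--     else:
--         return [next_gameweek]
-- ===== SOURCE B (Python) =====
-- def get_next_gws(fixtures: list, extra_gw: str = 'False') -> list:
--     """
--     Find the next gameweek(s) that have not yet started.
--
--     One pass builds a started-flag per event (OR of finished_provisional);
--     the answer is the minimum event whose flag is False.
--     """
--     started = {}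
--     for fixture in fixtures:
--         event = fixture["event"]
--         started[event] = started.get(event, False) or bool(fixture["finished_provisional"])
--     candidates = [event for event, done in started.items() if not done]
--     if not candidates:
--         raise Exception("No upcoming gameweek found.")
--     next_gameweek = min(candidates)
--     if extra_gw == 'True':
--         return [next_gameweek, next_gameweek + 1]
--     return [next_gameweek]
-- ===== Notes on version B (the rewrite author's own statement) =====
-- stated objective: simpler
-- what changed: Replaces A's defaultdict of per-event fixture lists followed by a sorted()-then-scan-with-break by a single pass building one boolean started-flag per event and a min() over the unstarted events; Pre_ excludes fixtures missing 'event'/'finished_provisional' where the access is not short-circuited away (A's early break skips accesses B's single pass performs, so B raises KeyError where A returns) and inputs with no fully-unstarted gameweek (both raise Exception).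
import Mathlib
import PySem

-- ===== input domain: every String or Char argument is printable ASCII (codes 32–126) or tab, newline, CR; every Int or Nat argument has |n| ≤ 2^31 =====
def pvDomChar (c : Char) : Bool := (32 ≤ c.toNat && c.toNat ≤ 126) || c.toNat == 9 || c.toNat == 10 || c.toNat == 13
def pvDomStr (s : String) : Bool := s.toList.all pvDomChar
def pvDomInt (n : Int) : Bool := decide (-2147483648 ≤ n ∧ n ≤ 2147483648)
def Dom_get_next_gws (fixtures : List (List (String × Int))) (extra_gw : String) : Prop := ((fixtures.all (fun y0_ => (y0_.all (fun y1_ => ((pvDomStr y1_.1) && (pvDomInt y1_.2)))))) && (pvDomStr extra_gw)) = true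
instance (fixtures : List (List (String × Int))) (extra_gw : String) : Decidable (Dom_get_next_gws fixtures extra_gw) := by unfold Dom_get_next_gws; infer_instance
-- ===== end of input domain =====

-- B replaces A's per-event fixture lists plus a sorted()-then-scan with a single pass
-- building a boolean started-flag per event followed by one min reduction (objective: simpler).
-- Equivalence is about the RETURN value; neither version mutates its arguments.

-- shared helpers: a fixture is a Python dict; fixture["key"] is a dict lookup
-- (getD 0 is only reached outside Pre_, where the Python raises KeyError)
def pvGet (f : List (String × Int)) (k : String) : Option Int := (PySem.Dict.ofList f).get? k

def pvEv (f : List (String × Int)) : Int := (pvGet f "event").getD 0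

def pvFin (f : List (String × Int)) : Int := (pvGet f "finished_provisional").getD 0

-- ===== PORT A =====
-- game_weeks = defaultdict(list); for fixture in fixtures: game_weeks[fixture["event"]].append(fixture)
def pvGroups (fixtures : List (List (String × Int))) : PySem.Dict Int (List (List (String × Int))) :=
  fixtures.foldl (fun d f => d.modify (pvEv f) [] (fun l => l ++ [f])) PySem.Dict.empty

def get_next_gws (fixtures : List (List (String × Int))) (extra_gw : String) : List Int :=
  -- for event in sorted(game_weeks.keys()): if all(not fixture['finished_provisional'] …): break
  match (PySem.List.sorted (pvGroups fixtures).keys (fun e => e)).find?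
      (fun e => ((pvGroups fixtures).getD e []).all (fun f => pvFin f == 0)) with
  | none => []  -- raise Exception("No upcoming gameweek found."): excluded by Pre_
  | some gw => if extra_gw == "True" then [gw, gw + 1] else [gw]

-- ===== PORT B =====
-- started[event] = started.get(event, False) or bool(fixture["finished_provisional"])
def pvStarted (fixtures : List (List (String × Int))) : PySem.Dict Int Bool :=
  fixtures.foldl (fun d f => d.insert (pvEv f) (d.getD (pvEv f) false || !(pvFin f == 0))) PySem.Dict.empty

def get_next_gws_alt (fixtures : List (List (String × Int))) (extra_gw : String) : List Int :=
  -- candidates = [event for event, done in started.items() if not done]; min(candidates)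
  match PySem.List.min? (((pvStarted fixtures).items.filter (fun p => !p.2)).map Prod.fst) (fun e => e) with
  | none => []  -- raise Exception("No upcoming gameweek found."): excluded by Pre_
  | some gw => if extra_gw == "True" then [gw, gw + 1] else [gw]

-- ===== PRECONDITION & SPEC =====
-- Pre_ excludes (a) fixtures missing
-- "event" or "finished_provisional" whose access neither program's short-circuit skips (an earlier truthy
-- same-event fixture shadows a missing "finished_provisional" for both; beyond that A's early break skips
-- accesses B's single pass performs — there B raises KeyError while A returns), and (b) inputs with no
-- fully-unstarted gameweek, where both A and B raise Exception("No upcoming gameweek found.").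
def Pre_get_next_gws (fixtures : List (List (String × Int))) (extra_gw : String) : Prop :=
  (∀ i, ∀ _ : i < fixtures.length,
    (pvGet fixtures[i] "event").isSome ∧
    ((pvGet fixtures[i] "finished_provisional").isSome ∨
      ∃ g ∈ fixtures.take i, pvEv g = pvEv fixtures[i] ∧ pvFin g ≠ 0)) ∧
  (∃ f ∈ fixtures, ∀ g ∈ fixtures, pvEv g = pvEv f → pvFin g = 0)

instance (fixtures : List (List (String × Int))) (extra_gw : String) : Decidable (Pre_get_next_gws fixtures extra_gw) := by unfold Pre_get_next_gws; infer_instance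

def pvWitness_get_next_gws : (List (List (String × Int))) × String :=
  ([[("event", 2), ("finished_provisional", 0)], [("event", 1), ("finished_provisional", 1)]], "False")

def Spec_get_next_gws (fixtures : List (List (String × Int))) (extra_gw : String) (out : List Int) : Prop := out = get_next_gws_alt fixtures extra_gw
instance (fixtures : List (List (String × Int))) (extra_gw : String) (out : List Int) : Decidable (Spec_get_next_gws fixtures extra_gw out) := by unfold Spec_get_next_gws; infer_instance

-- ===== CLAIM (what is proved, stated in full; the proofs are below) =====
def Claim_equal_get_next_gws : Prop := ∀ (fixtures : List (List (String × Int))) (extra_gw : String), Dom_get_next_gws fixtures extra_gw → Pre_get_next_gws fixtures extra_gw → Spec_get_next_gws fixtures extra_gw (get_next_gws fixtures extra_gw)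

-- ===== LEMMAS AND PROOFS =====

-- A's grouping dict holds, at each event e, exactly the fixtures with that event, in order
theorem pvGroups_getD (fixtures : List (List (String × Int)))
    (d : PySem.Dict Int (List (List (String × Int)))) (e : Int) :
    (fixtures.foldl (fun d f => d.modify (pvEv f) [] (fun l => l ++ [f])) d).getD e []
      = d.getD e [] ++ fixtures.filter (fun f => pvEv f == e) := by
  induction fixtures generalizing d with
  | nil => simp
  | cons f fs ih =>
    simp only [List.foldl_cons, ih, List.filter_cons]
    by_cases h : pvEv f = e
    · subst h
      simp [PySem.Dict.getD_modify_self]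
    · rw [PySem.Dict.getD_modify_of_ne _ _ _ (fun hne => h hne.symm)]
      simp [h]

-- B's flag dict holds, at each event e, whether any fixture with that event has started
theorem pvStarted_getD (fixtures : List (List (String × Int))) (d : PySem.Dict Int Bool) (e : Int) :
    (fixtures.foldl (fun d f => d.insert (pvEv f) (d.getD (pvEv f) false || !(pvFin f == 0))) d).getD e false
      = (d.getD e false || (fixtures.filter (fun f => pvEv f == e)).any (fun f => !(pvFin f == 0))) := by
  induction fixtures generalizing d with
  | nil => simp
  | cons f fs ih =>
    simp only [List.foldl_cons, ih, List.filter_cons]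
    by_cases h : pvEv f = e
    · subst h
      simp [PySem.Dict.getD_insert_self, Bool.or_assoc]
    · rw [PySem.Dict.getD_insert_of_ne _ _ _ (fun hne => h hne.symm)]
      simp [h]

-- a modify-fold touches the same keys, in the same order, as the corresponding insert-fold
theorem keys_foldl_modify (fixtures : List (List (String × Int)))
    (d : PySem.Dict Int (List (List (String × Int)))) :
    (fixtures.foldl (fun d f => d.modify (pvEv f) [] (fun l => l ++ [f])) d).keys
      = PySem.Set.update d.keys (fixtures.map pvEv) := by
  induction fixtures generalizing d with
  | nil => simp [PySem.Set.update]
  | cons f fs ih =>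
    simp only [List.foldl_cons, ih, List.map_cons]
    rw [PySem.Dict.keys_modify]
    have h1 := PySem.Dict.keys_foldl_insert_key [f] pvEv
      (fun d x => d.getD (pvEv x) [] ++ [x]) d
    simp only [List.foldl_cons, List.foldl_nil, List.map_cons, List.map_nil] at h1
    rw [h1]
    simp [PySem.Set.update]

-- both dicts enumerate the same keys
theorem pvKeys_eq (fixtures : List (List (String × Int))) :
    (pvGroups fixtures).keys = (pvStarted fixtures).keys := by
  rw [pvGroups, pvStarted, keys_foldl_modify,
    PySem.Dict.keys_foldl_insert_key fixtures pvEv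
      (fun d f => d.getD (pvEv f) false || !(pvFin f == 0))]
  rfl

theorem pvKeys_nodup (fixtures : List (List (String × Int))) :
    (pvStarted fixtures).keys.Nodup := by
  apply PySem.Dict.nodup_keys_foldl_insert_key
  simp [PySem.Dict.empty]

-- first hit of a predicate on the sorted distinct keys = minimum of the keys satisfying it
theorem find?_sorted_eq_min?_filter (K : List Int) (P : Int → Bool) (hK : K.Nodup) :
    (PySem.List.sorted K (fun e => e)).find? P = PySem.List.min? (K.filter P) (fun e => e) := by
  cases h : (PySem.List.sorted K (fun e => e)).find? P with
  | none =>
    simp only [List.find?_eq_none] at h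
    have : K.filter P = [] := by
      apply List.filter_eq_nil_iff.mpr
      intro x hx
      simp [h x ((PySem.List.mem_sorted K _ false x).mpr hx)]
    rw [this, (PySem.List.min?_eq_none_iff _ _).mpr rfl]
  | some m =>
    rw [List.find?_eq_some_iff_append] at h
    obtain ⟨hPm, as, bs, hS, hAs⟩ := h
    have hmem : m ∈ K := by
      rw [← PySem.List.mem_sorted K (fun e => e) false, hS]; simp
    have hnodupS : (PySem.List.sorted K (fun e => e)).Nodup :=
      (PySem.List.sorted_perm K (fun e => e) false).nodup_iff.mpr hK
    have hpw := PySem.List.sorted_pairwise K (fun e => e)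
    -- every key satisfying P is ≥ m, strictly if distinct
    have hmin : ∀ y ∈ K.filter P, m ≤ y := by
      intro y hy
      rw [List.mem_filter] at hy
      have hyS : y ∈ PySem.List.sorted K (fun e => e) :=
        (PySem.List.mem_sorted K _ false y).mpr hy.1
      rw [hS] at hyS
      rcases List.mem_append.mp hyS with hy1 | hy2
      · exact absurd hy.2 (by simpa using hAs y hy1)
      · rcases List.mem_cons.mp hy2 with rfl | hy3
        · exact le_refl y
        · rw [hS] at hpw
          exact (List.pairwise_cons.mp (List.pairwise_append.mp hpw).2.1).1 y hy3
    have hmF : m ∈ K.filter P := List.mem_filter.mpr ⟨hmem, hPm⟩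
    cases hmn : PySem.List.min? (K.filter P) (fun e => e) with
    | none => rw [PySem.List.min?_eq_none_iff] at hmn; simp [hmn] at hmF
    | some m' =>
      have h1 : m ≤ m' := hmin m' (PySem.List.min?_mem hmn)
      have h2 : m' ≤ m := PySem.List.min?_isMin hmn m hmF
      rw [le_antisymm h1 h2]

-- B's candidate list is the key list filtered by the not-started flag
theorem pvCandidates_eq (fixtures : List (List (String × Int))) :
    ((pvStarted fixtures).items.filter (fun p => !p.2)).map Prod.fst
      = (pvStarted fixtures).keys.filter (fun e => !(pvStarted fixtures).getD e false) := by
  rw [PySem.Dict.items_eq_map_keys (pvStarted fixtures) (pvKeys_nodup fixtures) false]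
  rw [List.filter_map, List.map_map]
  simp [Function.comp_def]

-- the two per-event tests agree: "all fixtures unfinished" = "not (any fixture finished)"
theorem pvPred_eq (fixtures : List (List (String × Int))) (e : Int) :
    ((pvGroups fixtures).getD e []).all (fun f => pvFin f == 0)
      = !(pvStarted fixtures).getD e false := by
  rw [pvGroups, pvStarted, pvGroups_getD, pvStarted_getD]
  simp [List.all_eq_not_any_not]

-- ===== VERDICT (by name: the statement is the Claim_ definition above) =====
theorem get_next_gws_spec : Claim_equal_get_next_gws := by
  intro fixtures extra_gw _ _
  show get_next_gws fixtures extra_gw = get_next_gws_alt fixtures extra_gw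
  rw [get_next_gws, get_next_gws_alt]
  have hfun : (fun e => ((pvGroups fixtures).getD e []).all (fun f => pvFin f == 0))
      = (fun e => !(pvStarted fixtures).getD e false) := funext (pvPred_eq fixtures)
  rw [hfun, pvKeys_eq, pvCandidates_eq,
    find?_sorted_eq_min?_filter _ _ (pvKeys_nodup fixtures)]
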